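-- pv_equiv track=rewrite | github.com/hung2003oke/gen_font_end | Gen_front_end.py | count_space
-- ===== SOURCE A (Python) =====
-- def count_space(lines):
--     kq = []
--     for line in lines:
--         t = 0
--         while t < len(line) and line[t].isspace():
--             t += 1
--         kq.append(t)
--     return kq
-- ===== SOURCE B (Python) =====
-- def count_space(lines):
--     return [len(line) - len(line.lstrip()) for line in lines]
-- ===== Notes on version B (the rewrite author's own statement) =====
-- stated objective: simpler
-- what changed: Replaces the per-character while-loop with append accumulator by a one-line comprehension computing len(line) - len(line.lstrip()) per line.
import Mathlib
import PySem

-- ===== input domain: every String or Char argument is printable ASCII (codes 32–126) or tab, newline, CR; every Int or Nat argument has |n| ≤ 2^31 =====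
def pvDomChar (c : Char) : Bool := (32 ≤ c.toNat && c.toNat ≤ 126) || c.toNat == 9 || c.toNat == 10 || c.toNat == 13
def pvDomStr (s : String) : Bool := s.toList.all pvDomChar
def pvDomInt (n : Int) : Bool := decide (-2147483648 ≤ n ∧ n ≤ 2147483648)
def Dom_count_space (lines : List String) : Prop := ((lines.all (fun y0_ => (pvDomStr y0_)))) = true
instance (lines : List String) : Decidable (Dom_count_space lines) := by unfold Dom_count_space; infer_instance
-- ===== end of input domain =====

-- B replaces A's per-character counting loop with a one-line comprehension computing
-- len(line) - len(line.lstrip()) per line (objective: simpler).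

-- ===== PORT A =====
-- 'while t < len(line) and line[t].isspace(): t += 1' — the while loop as structural recursion
def countSpaceWhile : List Char → Int
  | [] => 0
  | c :: rest => if PySem.Chars.isspace c then 1 + countSpaceWhile rest else 0

def count_space (lines : List String) : List Int :=
  lines.foldl (fun kq line => kq ++ [countSpaceWhile line.toList]) []

-- ===== PORT B =====
def count_space_alt (lines : List String) : List Int :=
  lines.map (fun line => PySem.Str.len line - PySem.Str.len (PySem.Str.lstrip line))

-- ===== PRECONDITION & SPEC =====
def Spec_count_space (lines : List String) (out : List Int) : Prop := out = count_space_alt lines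
instance (lines : List String) (out : List Int) : Decidable (Spec_count_space lines out) := by unfold Spec_count_space; infer_instance

-- ===== CLAIM (what is proved, stated in full; the proofs are below) =====
def Claim_equal_count_space : Prop := ∀ (lines : List String), Dom_count_space lines → Spec_count_space lines (count_space lines)

-- ===== LEMMAS AND PROOFS =====
theorem countSpaceWhile_eq (cs : List Char) :
    countSpaceWhile cs = (cs.length : Int) - ((PySem.Chars.lstrip cs).length : Int) := by
  induction cs with
  | nil => simp [countSpaceWhile, PySem.Chars.lstrip]
  | cons c rest ih =>
    by_cases h : PySem.Chars.isspace c
    · have hle : (List.dropWhile PySem.Chars.isspace rest).length ≤ rest.length :=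
        List.length_dropWhile_le _ _
      simp [countSpaceWhile, PySem.Chars.lstrip, h] at ih ⊢
      omega
    · simp [countSpaceWhile, PySem.Chars.lstrip, h]

theorem count_space_foldl_eq (lines : List String) (acc : List Int) :
    lines.foldl (fun kq line => kq ++ [countSpaceWhile line.toList]) acc
      = acc ++ lines.map (fun line => PySem.Str.len line - PySem.Str.len (PySem.Str.lstrip line)) := by
  induction lines generalizing acc with
  | nil => simp
  | cons l rest ih =>
    simp only [List.foldl_cons, List.map_cons, ih]
    have : countSpaceWhile l.toList
        = PySem.Str.len l - PySem.Str.len (PySem.Str.lstrip l) := by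
      rw [countSpaceWhile_eq]
      simp [PySem.Str.len_eq, PySem.Str.toList_lstrip]
    simp [this]

-- ===== VERDICT (by name: the statement is the Claim_ definition above) =====
theorem count_space_spec : Claim_equal_count_space := by
  intro lines _
  show count_space lines = count_space_alt lines
  simpa [count_space, count_space_alt] using count_space_foldl_eq lines []
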